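-- pv_equiv track=rewrite | github.com/PhucGiaNguyen99/Game2048 | CardGames.py | King_queen
-- ===== SOURCE A (Python) =====
-- def King_queen(deck):
--     n = len(deck)
--     for i in range(n - 1):
--         if deck[i][1] + deck[i + 1][1] in ['KQ', 'QK']:
--             return True
--         # Not the 2 positions before the last element
--         if i != n - 2:
--             if deck[i][1] + deck[i + 2][1] in ['KQ', 'QK']:
--                 return True
-- ===== SOURCE B (Python) =====
-- def King_queen(deck):
--     # Index the K and Q positions once, then test whether any King has a Queen
--     # within distance 1 or 2.
--     kpos = {i for i, card in enumerate(deck) if card[1] == 'K'}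
--     qpos = {i for i, card in enumerate(deck) if card[1] == 'Q'}
--     for p in kpos:
--         if any(q in qpos for q in (p - 2, p - 1, p + 1, p + 2)):
--             return True
-- ===== Notes on version B (the rewrite author's own statement) =====
-- stated objective: alternative
-- what changed: Instead of scanning consecutive index pairs and testing the concatenation of the two rank strings against 'KQ'/'QK', B builds the sets of King and Queen positions in one pass and tests, for each King position, whether a Queen sits within distance 2.
-- intended difference: On decks where ranks '', 'KQ' or 'QK' sit at distance 1 or 2 (and no real 'K'/'Q' pair does), A's string concatenation accidentally equals 'KQ' or 'QK' and A returns True; B returns None, the intended value, since '' next to 'KQ' is not a King-Queen pair. — e.g. on King_queen([("a", ""), ("b", "KQ")]): A returns some true, B returns none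
import Mathlib
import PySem

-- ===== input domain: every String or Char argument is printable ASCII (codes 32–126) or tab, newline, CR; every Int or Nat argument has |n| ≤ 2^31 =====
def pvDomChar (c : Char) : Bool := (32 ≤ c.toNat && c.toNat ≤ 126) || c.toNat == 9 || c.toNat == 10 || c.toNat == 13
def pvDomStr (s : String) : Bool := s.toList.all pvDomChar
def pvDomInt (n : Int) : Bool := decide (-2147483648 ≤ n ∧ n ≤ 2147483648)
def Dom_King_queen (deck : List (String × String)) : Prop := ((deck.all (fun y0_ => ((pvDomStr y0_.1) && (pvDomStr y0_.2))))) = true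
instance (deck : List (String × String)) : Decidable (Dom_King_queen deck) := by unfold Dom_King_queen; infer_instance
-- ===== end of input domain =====

-- B indexes King and Queen positions once and tests a ±2 window per King, instead of A's scan
-- over consecutive index pairs with string concatenation; objective: alternative.
-- On decks with degenerate ranks ('', 'KQ', 'QK') A's concatenation test fires accidentally;
-- that is the stated intended difference D_ below.

-- ===== PORT A =====
-- 'deck[i][1] + deck[i+1][1] in ['KQ', 'QK']' — string concatenation/equality ported
-- on .toList (exact: String append appends the character lists, String.toList_inj).
def pvCatKQ (a b : String) : Bool :=
  (a.toList ++ b.toList == ['K', 'Q']) || (a.toList ++ b.toList == ['Q', 'K'])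

def pvLoopA (deck : List (String × String)) (n : Int) : List Int → Option Bool
  | [] => none
  | i :: rest =>
    if pvCatKQ (PySem.List.pyGetD deck i ("", "")).2 (PySem.List.pyGetD deck (i + 1) ("", "")).2 then
      some true
    else if i ≠ n - 2 then
      if pvCatKQ (PySem.List.pyGetD deck i ("", "")).2 (PySem.List.pyGetD deck (i + 2) ("", "")).2 then
        some true
      else pvLoopA deck n rest
    else pvLoopA deck n rest

def King_queen (deck : List (String × String)) : Option Bool :=
  let n : Int := deck.length
  pvLoopA deck n (PySem.List.pyRange 0 (n - 1) 1)

-- ===== PORT B =====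
-- the two set comprehensions over enumerate(deck)
def pvPosOf (deck : List (String × String)) (tag : String) : PySem.Set Int :=
  PySem.Set.ofList (((PySem.List.enumerate deck).filter (fun p => p.2.2 == tag)).map (·.1))

-- 'for p in kpos: if any(q in qpos for q in (p-2, p-1, p+1, p+2)): return True' — the
-- loop's value is order-independent (True iff some element matches), ported as any.
def King_queen_alt (deck : List (String × String)) : Option Bool :=
  let kpos := pvPosOf deck "K"
  let qpos := pvPosOf deck "Q"
  if kpos.any (fun p => [p - 2, p - 1, p + 1, p + 2].any (fun q => PySem.Set.contains qpos q))
  then some true else none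

-- ===== PRECONDITION & SPEC =====
-- On decks where ranks '', 'KQ' or 'QK' sit at distance 1 or 2 (and no real K/Q pair does),
-- A's string-concatenation test fires accidentally and A returns True; B returns None,
-- which is the intended value: '' next to 'KQ' is not a King-Queen pair.
def D_King_queen (deck : List (String × String)) : Prop :=
  let r := deck.unzip.2
  let q := r.zip r.tail ++ r.zip r.tail.tail
  q.Disjoint [("K", "Q"), ("Q", "K")] ∧ ∃ p ∈ q, p.1 ++ p.2 ∈ ["KQ", "QK"]
instance (deck : List (String × String)) : Decidable (D_King_queen deck) := by
  unfold D_King_queen List.Disjoint; infer_instance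

def Spec_King_queen (deck : List (String × String)) (out : Option Bool) : Prop :=
  ¬ D_King_queen deck → out = King_queen_alt deck
instance (deck : List (String × String)) (out : Option Bool) : Decidable (Spec_King_queen deck out) := by
  unfold Spec_King_queen; infer_instance

def pvDiffWitness_King_queen : (List (String × String)) := [("a", ""), ("b", "KQ")]
def pvDiffWitnessOut_King_queen : (Option Bool) × (Option Bool) := (some true, none)

-- ===== CLAIM (what is proved, stated in full; the proofs are below) =====
def Claim_unchanged_King_queen : Prop :=
  ∀ (deck : List (String × String)), Dom_King_queen deck → Spec_King_queen deck (King_queen deck)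
def Claim_changed_King_queen : Prop :=
  Dom_King_queen (pvDiffWitness_King_queen) ∧ D_King_queen (pvDiffWitness_King_queen) ∧
  King_queen (pvDiffWitness_King_queen) = pvDiffWitnessOut_King_queen.1 ∧
  King_queen_alt (pvDiffWitness_King_queen) = pvDiffWitnessOut_King_queen.2 ∧
  pvDiffWitnessOut_King_queen.1 ≠ pvDiffWitnessOut_King_queen.2
def Claim_exact_King_queen : Prop :=
  ∀ (deck : List (String × String)), Dom_King_queen deck → D_King_queen deck →
    King_queen deck ≠ King_queen_alt deck

-- ===== LEMMAS AND PROOFS =====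

def pvGenPair (a b : String) : Bool := (a == "K" && b == "Q") || (a == "Q" && b == "K")
def pvDegPair (a b : String) : Bool :=
  (a == "" && b == "KQ") || (a == "KQ" && b == "") || (a == "" && b == "QK") || (a == "QK" && b == "")
-- rank pairs of deck at index distance 1 and 2 (the list D_King_queen quantifies over)
def pvNearPairs (deck : List (String × String)) : List (String × String) :=
  (deck.map Prod.snd).zip (deck.map Prod.snd).tail ++
    (deck.map Prod.snd).zip (deck.map Prod.snd).tail.tail

-- The loop-body condition of A at index i.
def pvCondA (deck : List (String × String)) (n : Int) (i : Int) : Bool :=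
  pvCatKQ (PySem.List.pyGetD deck i ("", "")).2 (PySem.List.pyGetD deck (i + 1) ("", "")).2 ||
    (decide (i ≠ n - 2) &&
      pvCatKQ (PySem.List.pyGetD deck i ("", "")).2 (PySem.List.pyGetD deck (i + 2) ("", "")).2)

theorem pvLoopA_eq (deck : List (String × String)) (n : Int) (l : List Int) :
    pvLoopA deck n l = if l.any (pvCondA deck n) then some true else none := by
  induction l with
  | nil => simp [pvLoopA]
  | cons i rest ih =>
    simp only [pvLoopA, List.any_cons, pvCondA]
    by_cases h1 : pvCatKQ (PySem.List.pyGetD deck i ("", "")).2 (PySem.List.pyGetD deck (i + 1) ("", "")).2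
    · simp [h1]
    · by_cases h2 : i ≠ n - 2
      · by_cases h3 : pvCatKQ (PySem.List.pyGetD deck i ("", "")).2 (PySem.List.pyGetD deck (i + 2) ("", "")).2
        · simp [h1, h2, h3]
        · simp [h1, h2, h3, ih]
      · simp [h1, h2, ih]

theorem pvAppend_two (l1 l2 : List Char) (x y : Char) :
    l1 ++ l2 = [x, y] ↔
      (l1 = [] ∧ l2 = [x, y]) ∨ (l1 = [x] ∧ l2 = [y]) ∨ (l1 = [x, y] ∧ l2 = []) := by
  rcases l1 with _ | ⟨c, _ | ⟨d, t⟩⟩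
  · simp
  · simp
  · rcases t with _ | ⟨e, t⟩
    · simp; tauto
    · simp

theorem pvToList_lit_iff (a s : String) : a = s ↔ a.toList = s.toList := by
  rw [← String.toList_inj]

-- A's concatenation test is: a genuine K/Q pair, or one of the degenerate splits.
theorem pvCatKQ_iff (a b : String) :
    pvCatKQ a b = true ↔
      ((a = "" ∧ b = "KQ") ∨ (a = "K" ∧ b = "Q") ∨ (a = "KQ" ∧ b = "") ∨
       (a = "" ∧ b = "QK") ∨ (a = "Q" ∧ b = "K") ∨ (a = "QK" ∧ b = "")) := by
  have h1 : ("K" : String).toList = ['K'] := rfl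
  have h2 : ("Q" : String).toList = ['Q'] := rfl
  have h3 : ("KQ" : String).toList = ['K', 'Q'] := rfl
  have h4 : ("QK" : String).toList = ['Q', 'K'] := rfl
  have h5 : ("" : String).toList = [] := rfl
  rw [pvCatKQ]
  simp only [Bool.or_eq_true, beq_iff_eq, pvAppend_two,
    pvToList_lit_iff a "K", pvToList_lit_iff a "Q", pvToList_lit_iff a "KQ",
    pvToList_lit_iff a "QK", pvToList_lit_iff a "",
    pvToList_lit_iff b "K", pvToList_lit_iff b "Q", pvToList_lit_iff b "KQ",
    pvToList_lit_iff b "QK", pvToList_lit_iff b "", h1, h2, h3, h4, h5, or_assoc]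

theorem pvGenDeg_iff (a b : String) :
    (pvGenPair a b || pvDegPair a b) = true ↔
      ((a = "" ∧ b = "KQ") ∨ (a = "K" ∧ b = "Q") ∨ (a = "KQ" ∧ b = "") ∨
       (a = "" ∧ b = "QK") ∨ (a = "Q" ∧ b = "K") ∨ (a = "QK" ∧ b = "")) := by
  simp only [pvGenPair, pvDegPair, Bool.or_eq_true, Bool.and_eq_true, beq_iff_eq]
  tauto

theorem pvCatKQ_split (a b : String) :
    pvCatKQ a b = (pvGenPair a b || pvDegPair a b) := by
  rw [Bool.eq_iff_iff, pvCatKQ_iff, pvGenDeg_iff]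

theorem pvRank_eq (deck : List (String × String)) (i : Nat) (h : i < deck.length) :
    PySem.List.pyGetD deck (i : Int) ("", "") = deck[i] := by
  simp [PySem.List.pyGetD_natCast, List.getD_eq_getElem?_getD, h]

-- any over pvNearPairs = a rank pair at distance 1 or 2
theorem pvNear_any_iff (deck : List (String × String)) (f : String → String → Bool) :
    ((pvNearPairs deck).any (fun pr => f pr.1 pr.2) = true) ↔
      ∃ (i d : Nat), (d = 1 ∨ d = 2) ∧ ∃ h : i + d < deck.length,
        f (deck[i]'(by omega)).2 (deck[i + d]'h).2 := by
  unfold pvNearPairs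
  have e2 : (deck.map Prod.snd).tail.tail = (deck.map Prod.snd).drop 2 := by
    rw [← List.drop_one, ← List.drop_one, List.drop_drop]
  have e1 : (deck.map Prod.snd).tail = (deck.map Prod.snd).drop 1 := List.drop_one.symm
  rw [e2, e1]
  simp only [List.any_append, Bool.or_eq_true, List.any_eq_true]
  constructor
  · rintro (⟨x, hx, hf⟩ | ⟨x, hx, hf⟩) <;>
      obtain ⟨i, hi, rfl⟩ := List.mem_iff_getElem.1 hx <;>
      simp only [List.length_zip, List.length_drop, List.length_map, lt_min_iff] at hi
    · refine ⟨i, 1, Or.inl rfl, by omega, ?_⟩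
      simpa [List.getElem_zip, List.getElem_drop, List.getElem_map, Nat.add_comm] using hf
    · refine ⟨i, 2, Or.inr rfl, by omega, ?_⟩
      simpa [List.getElem_zip, List.getElem_drop, List.getElem_map, Nat.add_comm] using hf
  · rintro ⟨i, d, hd | hd, h, hf⟩ <;> subst hd
    · refine Or.inl ⟨((deck.map Prod.snd).zip ((deck.map Prod.snd).drop 1))[i]'(by
        simp only [List.length_zip, List.length_drop, List.length_map]; omega),
        List.getElem_mem _, ?_⟩
      simpa [List.getElem_zip, List.getElem_drop, List.getElem_map, Nat.add_comm] using hf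
    · refine Or.inr ⟨((deck.map Prod.snd).zip ((deck.map Prod.snd).drop 2))[i]'(by
        simp only [List.length_zip, List.length_drop, List.length_map]; omega),
        List.getElem_mem _, ?_⟩
      simpa [List.getElem_zip, List.getElem_drop, List.getElem_map, Nat.add_comm] using hf

-- A returns some true iff some near pair passes the concatenation test.
theorem King_queen_eq_ite (deck : List (String × String)) :
    King_queen deck =
      if (pvNearPairs deck).any (fun pr => pvCatKQ pr.1 pr.2) then some true else none := by
  rw [King_queen, pvLoopA_eq]
  have hc : (PySem.List.pyRange 0 ((deck.length : Int) - 1) 1).any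
      (pvCondA deck (deck.length : Int)) =
      (pvNearPairs deck).any (fun pr => pvCatKQ pr.1 pr.2) := by
    rw [Bool.eq_iff_iff, pvNear_any_iff, List.any_eq_true]
    constructor
    · rintro ⟨i, hmem, hcond⟩
      rw [PySem.List.mem_pyRange_one] at hmem
      obtain ⟨hi0, hilt⟩ := hmem
      obtain ⟨j, rfl⟩ : ∃ j : Nat, i = (j : Int) := ⟨i.toNat, (Int.toNat_of_nonneg hi0).symm⟩
      rw [pvCondA, Bool.or_eq_true] at hcond
      rcases hcond with hc | hc
      · have e1 : (j : Int) + 1 = ((j + 1 : Nat) : Int) := by push_cast; ring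
        rw [e1, pvRank_eq deck j (by omega), pvRank_eq deck (j + 1) (by omega)] at hc
        exact ⟨j, 1, Or.inl rfl, by omega, hc⟩
      · rw [Bool.and_eq_true, decide_eq_true_eq] at hc
        obtain ⟨hne, hc⟩ := hc
        have hj2 : j + 2 < deck.length := by omega
        have e2 : (j : Int) + 2 = ((j + 2 : Nat) : Int) := by push_cast; ring
        rw [e2, pvRank_eq deck j (by omega), pvRank_eq deck (j + 2) hj2] at hc
        exact ⟨j, 2, Or.inr rfl, hj2, hc⟩
    · rintro ⟨j, d, hd | hd, h, hf⟩ <;> subst hd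
      · refine ⟨(j : Int), PySem.List.mem_pyRange_one.2 ⟨by omega, by omega⟩, ?_⟩
        rw [pvCondA]
        have e1 : (j : Int) + 1 = ((j + 1 : Nat) : Int) := by push_cast; ring
        rw [e1, pvRank_eq deck j (by omega), pvRank_eq deck (j + 1) (by omega), hf]
        simp
      · refine ⟨(j : Int), PySem.List.mem_pyRange_one.2 ⟨by omega, by omega⟩, ?_⟩
        rw [pvCondA]
        have e2 : (j : Int) + 2 = ((j + 2 : Nat) : Int) := by push_cast; ring
        rw [e2, pvRank_eq deck j (by omega), pvRank_eq deck (j + 2) (by omega), hf]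
        have hne : ((j : Int) ≠ (deck.length : Int) - 2) := by omega
        simp [hne]

  rw [hc]
theorem pvPos_mem (deck : List (String × String)) (tag : String) (x : Int) :
    x ∈ pvPosOf deck tag ↔
      ∃ (i : Nat), ∃ _h : i < deck.length, x = (i : Int) ∧ deck[i].2 = tag := by
  rw [pvPosOf, PySem.Set.mem_ofList]
  simp only [List.mem_map, List.mem_filter, PySem.List.mem_enumerate_iff, beq_iff_eq]
  constructor
  · rintro ⟨p, ⟨⟨i, hi, rfl⟩, htag⟩, rfl⟩
    exact ⟨i, hi, by simp, by simpa using htag⟩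
  · rintro ⟨i, hi, rfl, htag⟩
    exact ⟨((i : Int), deck[i]), ⟨⟨i, hi, by simp⟩, by simpa using htag⟩, rfl⟩

-- B returns some true iff some near pair is a genuine K/Q pair.
theorem King_queen_alt_eq_ite (deck : List (String × String)) :
    King_queen_alt deck =
      if (pvNearPairs deck).any (fun pr => pvGenPair pr.1 pr.2) then some true else none := by
  rw [King_queen_alt]
  have hc : (pvPosOf deck "K").any
      (fun p => [p - 2, p - 1, p + 1, p + 2].any (fun q => PySem.Set.contains (pvPosOf deck "Q") q)) =
      (pvNearPairs deck).any (fun pr => pvGenPair pr.1 pr.2) := by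
    rw [Bool.eq_iff_iff, pvNear_any_iff, List.any_eq_true]
    simp only [List.any_cons, List.any_nil, Bool.or_false, Bool.or_eq_true,
      PySem.Set.contains_iff]
    constructor
    · rintro ⟨p, hp, hq⟩
      rw [pvPos_mem] at hp
      obtain ⟨i, hi, rfl, hK⟩ := hp
      rcases hq with hq | hq | hq | hq <;> rw [pvPos_mem] at hq <;>
        obtain ⟨j, hj, hje, hQ⟩ := hq
      · -- Q at i - 2
        have : j + 2 = i := by omega
        subst this
        exact ⟨j, 2, Or.inr rfl, by omega, by simp [pvGenPair, hK, hQ]⟩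
      · have : j + 1 = i := by omega
        subst this
        exact ⟨j, 1, Or.inl rfl, by omega, by simp [pvGenPair, hK, hQ]⟩
      · have : j = i + 1 := by omega
        subst this
        exact ⟨i, 1, Or.inl rfl, by omega, by simp [pvGenPair, hK, hQ]⟩
      · have : j = i + 2 := by omega
        subst this
        exact ⟨i, 2, Or.inr rfl, by omega, by simp [pvGenPair, hK, hQ]⟩
    · rintro ⟨i, d, hd, h, hf⟩
      rw [pvGenPair, Bool.or_eq_true, Bool.and_eq_true, Bool.and_eq_true] at hf
      simp only [beq_iff_eq] at hf
      rcases hf with ⟨hK, hQ⟩ | ⟨hQ, hK⟩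
      · -- K at i, Q at i + d
        refine ⟨(i : Int), (pvPos_mem deck "K" _).2 ⟨i, by omega, rfl, hK⟩, ?_⟩
        rcases hd with rfl | rfl
        · exact Or.inr (Or.inr (Or.inl ((pvPos_mem deck "Q" _).2
            ⟨i + 1, by omega, by push_cast; ring, hQ⟩)))
        · exact Or.inr (Or.inr (Or.inr ((pvPos_mem deck "Q" _).2
            ⟨i + 2, by omega, by push_cast; ring, hQ⟩)))
      · -- Q at i, K at i + d
        refine ⟨((i + d : Nat) : Int), (pvPos_mem deck "K" _).2 ⟨i + d, h, rfl, hK⟩, ?_⟩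
        rcases hd with rfl | rfl
        · exact Or.inr (Or.inl ((pvPos_mem deck "Q" _).2
            ⟨i, by omega, by push_cast; ring, hQ⟩))
        · exact Or.inl ((pvPos_mem deck "Q" _).2
            ⟨i, by omega, by push_cast; ring, hQ⟩)
  rw [hc]

theorem pvCat_any_eq (deck : List (String × String)) :
    (pvNearPairs deck).any (fun pr => pvCatKQ pr.1 pr.2) =
      ((pvNearPairs deck).any (fun pr => pvGenPair pr.1 pr.2) ||
       (pvNearPairs deck).any (fun pr => pvDegPair pr.1 pr.2)) := by
  rw [Bool.eq_iff_iff, Bool.or_eq_true]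
  simp only [List.any_eq_true, pvCatKQ_split, Bool.or_eq_true]
  constructor
  · rintro ⟨x, hx, h | h⟩
    · exact Or.inl ⟨x, hx, h⟩
    · exact Or.inr ⟨x, hx, h⟩
  · rintro (⟨x, hx, h⟩ | ⟨x, hx, h⟩)
    · exact ⟨x, hx, Or.inl h⟩
    · exact ⟨x, hx, Or.inr h⟩

-- D_ in terms of the Bool predicates used by the characterizations above
theorem pvCat_mem_iff (a b : String) :
    a ++ b ∈ [("KQ" : String), "QK"] ↔ pvCatKQ a b = true := by
  rw [pvCatKQ]
  simp only [List.mem_cons, List.not_mem_nil, or_false, Bool.or_eq_true, beq_iff_eq,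
    ← String.toList_inj, String.toList_append]
  rfl

theorem pvGen_mem_iff (p : String × String) :
    p ∈ [(("K" : String), ("Q" : String)), ("Q", "K")] ↔ pvGenPair p.1 p.2 = true := by
  obtain ⟨a, b⟩ := p
  simp only [List.mem_cons, List.not_mem_nil, or_false, Prod.mk.injEq, pvGenPair,
    Bool.or_eq_true, Bool.and_eq_true, beq_iff_eq]
  try tauto

theorem pvD_iff (deck : List (String × String)) :
    D_King_queen deck ↔
      ((pvNearPairs deck).any (fun pr => pvCatKQ pr.1 pr.2) = true ∧
       (pvNearPairs deck).any (fun pr => pvGenPair pr.1 pr.2) = false) := by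
  unfold D_King_queen
  simp only []
  rw [List.unzip_snd]
  rw [show (deck.map Prod.snd).zip (deck.map Prod.snd).tail ++
      (deck.map Prod.snd).zip (deck.map Prod.snd).tail.tail = pvNearPairs deck from rfl]
  constructor
  · rintro ⟨hdis, p, hp, hc⟩
    refine ⟨List.any_eq_true.2 ⟨p, hp, (pvCat_mem_iff p.1 p.2).1 hc⟩, ?_⟩
    rw [Bool.eq_false_iff]
    intro hgen
    obtain ⟨x, hx, hxg⟩ := List.any_eq_true.1 hgen
    exact hdis hx ((pvGen_mem_iff x).2 hxg)
  · rintro ⟨hcat, hgen⟩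
    obtain ⟨p, hp, hpc⟩ := List.any_eq_true.1 hcat
    refine ⟨fun x hx hxm => ?_, p, hp, (pvCat_mem_iff p.1 p.2).2 hpc⟩
    rw [Bool.eq_false_iff] at hgen
    exact hgen (List.any_eq_true.2 ⟨x, hx, (pvGen_mem_iff x).1 hxm⟩)

-- ===== VERDICT (by name: the statements are the Claim_ definitions above) =====
theorem King_queen_spec : Claim_unchanged_King_queen := by
  intro deck _ hnd
  rw [pvD_iff] at hnd
  rw [King_queen_eq_ite, King_queen_alt_eq_ite]
  cases hc : (pvNearPairs deck).any (fun pr => pvCatKQ pr.1 pr.2) with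
  | false =>
    have hg : (pvNearPairs deck).any (fun pr => pvGenPair pr.1 pr.2) = false := by
      have h := pvCat_any_eq deck
      rw [hc] at h
      exact (Bool.or_eq_false_iff.1 h.symm).1
    rw [hg]
  | true =>
    have hg : (pvNearPairs deck).any (fun pr => pvGenPair pr.1 pr.2) = true := by
      rcases Bool.eq_false_or_eq_true ((pvNearPairs deck).any (fun pr => pvGenPair pr.1 pr.2))
        with h | h
      · exact h
      · exact absurd ⟨hc, h⟩ hnd
    rw [hg]

theorem King_queen_changed : Claim_changed_King_queen := by
  unfold Claim_changed_King_queen; decide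

theorem King_queen_tight : Claim_exact_King_queen := by
  intro deck _ hd
  obtain ⟨hcat, hgen⟩ := (pvD_iff deck).1 hd
  rw [King_queen_eq_ite, King_queen_alt_eq_ite, hcat, hgen]
  simp
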